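-- pv_equiv track=rewrite | github.com/cukelarter/Debug_AI_Programs | s004_e00833.py | solve
-- ===== SOURCE A (Python) =====
-- def solve(n, k, a):
--     # Compute the number of elements to replace.
--     pairs=get_pairs(a)
--     test_x=[sum(pair) for pair in pairs] # get starting x values
--     if test_x.count(test_x[0]) == len(test_x): # if test xs are equal no change necessary
--         return 0
--     else:
--         for ii in range(len(test_x)):
--             x=test_x[ii]
--             test_pairs = pairs[:ii]+pairs[ii+1:]
--             offset = sum([sum(pair)==x for pair in test_pairs]) # accounts for x of test pair matching x of other pairs
--
--             if all([canReformat(pair,x,k) for pair in test_pairs]):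
--                 # if all can be reformatted to x, return how many pairs need modification
--                 return int(n/2-1-offset)
--         return int(n/2) # solution requires changing every pair
--
-- def canReformat(pair, x, k):
--     # Determine if any number of a pair of numbers can be replaced
--     # such that the new pair is equal to x, and the replacing number is less than k
--     a1,a2=pair
--     # calculate all possible pairs that can be generated through replacement
--     pairsums1=[a1+c for c in range(1,k+1)]
--     pairsums2=[a2+c for c in range(1,k+1)]
--     psums=pairsums1+pairsums2
--     return x in psums
--
-- def get_pairs(a):
--     # Retreives pairs from array a
--     return [(a[i],a[len(a)-i-1]) for i in range(0,int(len(a)/2))]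
-- ===== SOURCE B (Python) =====
-- def solve(n, k, a):
--     # Counter of pair sums + per-distinct-sum coverage table + O(1) interval
--     # reach test, instead of A's per-candidate rescans and O(k) range lists.
--     m = len(a) // 2
--     pairs = [(a[i], a[-i - 1]) for i in range(m)]
--     sums = [p + q for p, q in pairs]
--     if sums.count(sums[0]) == len(sums):
--         return 0
--     counts = {}
--     for s in sums:
--         counts[s] = counts.get(s, 0) + 1
--     cov = {}
--     for x in counts:
--         cov[x] = sum(1 for p, q in pairs
--                      if p + 1 <= x <= p + k or q + 1 <= x <= q + k)
--     for ii in range(m):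
--         x = sums[ii]
--         p, q = pairs[ii]
--         reach_self = 1 if (p + 1 <= x <= p + k or q + 1 <= x <= q + k) else 0
--         if cov[x] - reach_self == m - 1:
--             return _trunc_half(n - 2 * counts[x])
--     return _trunc_half(n)
--
-- def _trunc_half(t):
--     # int(t/2): truncation toward zero
--     return t // 2 if t >= 0 else -((-t) // 2)
-- ===== Notes on version B (the rewrite author's own statement) =====
-- stated objective: faster
-- what changed: B precomputes a Counter of the pair sums and a coverage table (reachable-pair count per distinct sum) once, and tests reachability with O(1) interval arithmetic, so A's per-candidate O(m) offset rescan and O(k) range-list builds inside canReformat disappear; the main loop then decides each candidate with dictionary lookups.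
import Mathlib
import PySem

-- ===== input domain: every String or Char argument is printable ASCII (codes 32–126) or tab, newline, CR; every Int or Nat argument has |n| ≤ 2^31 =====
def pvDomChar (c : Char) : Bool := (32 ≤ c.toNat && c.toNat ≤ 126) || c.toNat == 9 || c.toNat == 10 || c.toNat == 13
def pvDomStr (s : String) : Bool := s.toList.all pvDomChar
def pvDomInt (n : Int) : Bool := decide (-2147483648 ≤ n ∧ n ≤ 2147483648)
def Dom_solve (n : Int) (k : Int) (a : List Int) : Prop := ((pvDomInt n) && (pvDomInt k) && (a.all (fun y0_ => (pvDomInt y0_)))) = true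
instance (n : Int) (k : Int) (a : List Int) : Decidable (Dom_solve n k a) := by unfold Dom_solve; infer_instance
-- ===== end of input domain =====

-- B replaces A's per-candidate rescans (O(k)-long range lists in canReformat and a
-- fresh offset recount per candidate) by a Counter of the pair sums, a coverage
-- table over the distinct sums, and an O(1) interval reach test.

-- ===== PORT A =====
def canReformat (pair : Int × Int) (x : Int) (k : Int) : Bool :=
  let pairsums1 := (PySem.List.pyRange 1 (k+1) 1).map (fun c => pair.1 + c)
  let pairsums2 := (PySem.List.pyRange 1 (k+1) 1).map (fun c => pair.2 + c)
  (pairsums1 ++ pairsums2).contains x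

-- int(len(a)/2) = trunc division; a.length ≥ 0 so Int.tdiv is exact
def get_pairs (a : List Int) : List (Int × Int) :=
  (PySem.List.pyRange 0 (Int.tdiv (a.length : Int) 2) 1).map (fun i =>
    (PySem.List.pyGetD a i 0, PySem.List.pyGetD a ((a.length : Int) - i - 1) 0))

-- the 'for ii in range(len(test_x))' loop with its early returns
-- int(n/2-1-offset) = trunc((n-2-2*offset)/2) = Int.tdiv (n-2-2*offset) 2, exact
def solveLoop (n : Int) (k : Int) (pairs : List (Int × Int)) (test_x : List Int) : List Int → Int
  | [] => Int.tdiv n 2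
  | ii :: rest =>
    let x := PySem.List.pyGetD test_x ii 0
    let test_pairs := PySem.List.slice pairs none (some ii) ++ PySem.List.slice pairs (some (ii+1)) none
    let offset : Int := (test_pairs.map (fun pr => if pr.1 + pr.2 = x then (1:Int) else 0)).sum
    if test_pairs.all (fun pr => canReformat pr x k) then Int.tdiv (n - 2 - 2*offset) 2
    else solveLoop n k pairs test_x rest

def solve (n : Int) (k : Int) (a : List Int) : Int :=
  let pairs := get_pairs a
  let test_x := pairs.map (fun p => p.1 + p.2)
  if PySem.List.count test_x (PySem.List.pyGetD test_x 0 0) = test_x.length then 0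
  else solveLoop n k pairs test_x (PySem.List.pyRange 0 (test_x.length : Int) 1)

-- ===== PORT B =====
-- p + 1 <= x <= p + k or q + 1 <= x <= q + k
def reachPair (p : Int × Int) (x : Int) (k : Int) : Bool :=
  decide ((p.1 + 1 ≤ x ∧ x ≤ p.1 + k) ∨ (p.2 + 1 ≤ x ∧ x ≤ p.2 + k))

-- _trunc_half: t // 2 if t >= 0 else -((-t) // 2)
def truncHalf (t : Int) : Int :=
  if 0 ≤ t then PySem.Int.floordiv t 2 else -(PySem.Int.floordiv (-t) 2)

-- [(a[i], a[-i-1]) for i in range(m)]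
def altPairs (a : List Int) (m : Int) : List (Int × Int) :=
  (PySem.List.pyRange 0 m 1).map (fun i =>
    (PySem.List.pyGetD a i 0, PySem.List.pyGetD a (-i - 1) 0))

-- counts[s] = counts.get(s, 0) + 1 loop
def buildCounts (sums : List Int) : PySem.Dict Int Int :=
  sums.foldl (fun d s => d.insert s (d.getD s 0 + 1)) PySem.Dict.empty

-- cov[x] = sum(1 for p, q in pairs if reach) over the keys of counts
def buildCov (k : Int) (pairs : List (Int × Int)) (keys : List Int) : PySem.Dict Int Int :=
  keys.foldl (fun d x => d.insert x ((pairs.countP (fun p => reachPair p x k) : Int))) PySem.Dict.empty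

def solveAltLoop (n : Int) (k : Int) (m : Int) (pairs : List (Int × Int)) (sums : List Int)
    (counts : PySem.Dict Int Int) (cov : PySem.Dict Int Int) : List Int → Int
  | [] => truncHalf n
  | ii :: rest =>
    let x := PySem.List.pyGetD sums ii 0
    let pr := PySem.List.pyGetD pairs ii (0, 0)
    let reach_self : Int := if reachPair pr x k then 1 else 0
    if cov.getD x 0 - reach_self = m - 1 then truncHalf (n - 2 * counts.getD x 0)
    else solveAltLoop n k m pairs sums counts cov rest

def solve_alt (n : Int) (k : Int) (a : List Int) : Int :=
  let m := PySem.Int.floordiv (a.length : Int) 2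
  let pairs := altPairs a m
  let sums := pairs.map (fun p => p.1 + p.2)
  if PySem.List.count sums (PySem.List.pyGetD sums 0 0) = sums.length then 0
  else
    let counts := buildCounts sums
    let cov := buildCov k pairs counts.keys
    solveAltLoop n k m pairs sums counts cov (PySem.List.pyRange 0 m 1)

-- ===== PRECONDITION & SPEC =====
-- Pre_ excludes a with fewer than 2 elements: there are no pairs, and A's test_x[0] raises IndexError.
def Pre_solve (n : Int) (k : Int) (a : List Int) : Prop := 2 ≤ a.length
instance (n : Int) (k : Int) (a : List Int) : Decidable (Pre_solve n k a) := by unfold Pre_solve; infer_instance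
def pvWitness_solve : Int × Int × List Int := (4, 2, [1, 2, 3, 4])

def Spec_solve (n : Int) (k : Int) (a : List Int) (out : Int) : Prop := out = solve_alt n k a
instance (n : Int) (k : Int) (a : List Int) (out : Int) : Decidable (Spec_solve n k a out) := by unfold Spec_solve; infer_instance

-- ===== CLAIM (what is proved, stated in full; the proofs are below) =====
def Claim_equal_solve : Prop := ∀ (n : Int) (k : Int) (a : List Int), Dom_solve n k a → Pre_solve n k a → Spec_solve n k a (solve n k a)

-- ===== LEMMAS AND PROOFS =====

-- int(t/2) both ways: truncation toward zero
lemma truncHalf_eq_tdiv (t : Int) : truncHalf t = Int.tdiv t 2 := by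
  unfold truncHalf
  split_ifs with h
  · rw [PySem.Int.floordiv_eq_ediv_of_pos (by omega), Int.tdiv_eq_ediv]; omega
  · rw [PySem.Int.floordiv_eq_ediv_of_pos (by omega)]
    rw [show t = -(-t) by ring, Int.neg_tdiv, Int.tdiv_eq_ediv] <;> omega

-- canReformat's range-list membership is the interval test
lemma canReformat_eq_reachPair (pr : Int × Int) (x k : Int) :
    canReformat pr x k = reachPair pr x k := by
  have h : (canReformat pr x k = true) = (reachPair pr x k = true) := by
    simp only [canReformat, reachPair, List.contains_eq_mem, List.mem_append, List.mem_map,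
      PySem.List.mem_pyRange_one, decide_eq_true_eq]
    refine propext ?_
    constructor
    · rintro (⟨c, hc, rfl⟩ | ⟨c, hc, rfl⟩) <;> omega
    · rintro (h | h)
      · exact Or.inl ⟨x - pr.1, by omega, by ring⟩
      · exact Or.inr ⟨x - pr.2, by omega, by ring⟩
  exact Bool.coe_iff_coe.mp (by rw [h])

-- the two pair lists coincide
lemma get_pairs_eq_altPairs (a : List Int) :
    get_pairs a = altPairs a (PySem.Int.floordiv (a.length : Int) 2) := by
  unfold get_pairs altPairs
  have htd : Int.tdiv (a.length : Int) 2 = PySem.Int.floordiv (a.length : Int) 2 := by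
    rw [PySem.Int.floordiv_eq_ediv_of_pos (by omega), Int.tdiv_eq_ediv]; omega
  rw [htd]
  apply List.map_congr_left
  intro i hi
  rw [PySem.List.mem_pyRange_one] at hi
  obtain ⟨h0, h1⟩ := hi
  have hl : (i+1).toNat ≤ a.length := by
    rw [PySem.Int.floordiv_eq_ediv_of_pos (by omega)] at h1; omega
  have h2 : (-i - 1) = -(((i+1).toNat : Nat) : Int) := by omega
  have h3 : ((a.length : Int) - i - 1) = ((a.length - (i+1).toNat : Nat) : Int) := by omega
  rw [h2, PySem.List.pyGetD_neg_natCast _ _ _ (by omega) hl, h3, PySem.List.pyGetD_natCast,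
    List.getD_eq_getElem?_getD, List.getElem?_eq_getElem (by omega)]
  simp

lemma getD_buildCounts (sums : List Int) (x : Int) :
    (buildCounts sums).getD x 0 = (sums.count x : Int) := by
  unfold buildCounts
  rw [PySem.Dict.getD_foldl_insert_add_one]
  simp [PySem.Dict.getD_empty]

lemma keys_buildCounts (sums : List Int) :
    (buildCounts sums).keys = PySem.Set.ofList sums := by
  unfold buildCounts
  rw [PySem.Dict.keys_foldl_insert]
  simp [PySem.Dict.keys_empty, PySem.Set.update_nil_left]

-- a fold of inserts whose values depend only on the key
lemma getD_foldl_insert_const (f : Int → Int) (l : List Int) (d : PySem.Dict Int Int) (x d0 : Int) :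
    (l.foldl (fun d y => d.insert y (f y)) d).getD x d0 = if x ∈ l then f x else d.getD x d0 := by
  induction l generalizing d with
  | nil => simp
  | cons y t ih =>
    simp only [List.foldl_cons, ih, PySem.Dict.getD_insert, List.mem_cons]
    by_cases hxt : x ∈ t <;> by_cases hxy : x = y <;> simp [hxt, hxy]

lemma getD_buildCov (k : Int) (pairs : List (Int × Int)) (keys : List Int) (x : Int)
    (hx : x ∈ keys) :
    (buildCov k pairs keys).getD x 0 = (pairs.countP (fun p => reachPair p x k) : Int) := by
  unfold buildCov
  rw [getD_foldl_insert_const]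
  simp [hx]

-- countP of a list splits around the element at index j
lemma countP_split (P : List (Int × Int)) (j : Nat) (h : j < P.length) (q : Int × Int → Bool) :
    P.countP q = (P.take j ++ P.drop (j+1)).countP q + (if q P[j] then 1 else 0) := by
  conv_lhs => rw [← List.take_append_drop j P, List.drop_eq_getElem_cons h]
  rw [List.countP_append, List.countP_cons, List.countP_append]
  split_ifs <;> omega

-- A's 0/1-sum offset is a countP
lemma sum_ite_eq_countP (l : List (Int × Int)) (x : Int) :
    (l.map (fun pr => if pr.1 + pr.2 = x then (1:Int) else 0)).sum
      = (l.countP (fun pr => pr.1 + pr.2 == x) : Int) := by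
  have he : (fun pr : Int × Int => if pr.1 + pr.2 = x then (1:Int) else 0)
      = fun pr => if (pr.1 + pr.2 == x) = true then (1:Int) else 0 := by
    funext pr; simp
  rw [he, PySem.List.sum_map_ite_one_zero]

lemma loop_eq (n k : Int) (P : List (Int × Int)) (S : List Int)
    (hS : S = P.map (fun p => p.1 + p.2))
    (counts cov : PySem.Dict Int Int)
    (hc : ∀ x, counts.getD x 0 = (S.count x : Int))
    (hcov : ∀ x, x ∈ S → cov.getD x 0 = (P.countP (fun p => reachPair p x k) : Int))
    (idxs : List Int) (hidx : ∀ i ∈ idxs, 0 ≤ i ∧ i < (P.length : Int)) :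
    solveLoop n k P S idxs = solveAltLoop n k (P.length : Int) P S counts cov idxs := by
  induction idxs with
  | nil => simp [solveLoop, solveAltLoop, truncHalf_eq_tdiv]
  | cons ii rest ih =>
    obtain ⟨h0, h1⟩ := hidx ii (List.mem_cons_self ..)
    have hjlt : ii.toNat < P.length := by omega
    set j := ii.toNat with hj
    have hSlen : S.length = P.length := by rw [hS]; simp
    have hxd : PySem.List.pyGetD S ii 0 = S[j] := by
      exact PySem.List.pyGetD_eq_getElem S 0 h0 (by omega)
    have hxv : S[j] = P[j].1 + P[j].2 := by
      subst hS; simp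
    have hxmem : S[j] ∈ S := List.getElem_mem _
    have hprd : PySem.List.pyGetD P ii (0,0) = P[j] :=
      PySem.List.pyGetD_eq_getElem P (0,0) h0 (by omega)
    have hslice : PySem.List.slice P none (some ii) ++ PySem.List.slice P (some (ii+1)) none
        = P.take j ++ P.drop (j+1) := by
      rw [PySem.List.slice_to P h0, PySem.List.slice_from P (by omega)]
      congr 2
      omega
    set x := S[j] with hx
    set T := P.take j ++ P.drop (j+1) with hT
    have hTlen : T.length = P.length - 1 := by
      simp [hT]; omega
    have hreach := countP_split P j hjlt (fun p => reachPair p x k)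
    have hreachle : T.countP (fun p => reachPair p x k) ≤ T.length := List.countP_le_length
    rw [← hT] at hreach
    have hall : (T.all (fun pr => canReformat pr x k) = true)
        ↔ T.countP (fun p => reachPair p x k) = T.length := by
      simp only [List.all_eq_true, canReformat_eq_reachPair]
      rw [Iff.comm]
      exact List.countP_eq_length
    have hcond : (cov.getD x 0 - (if reachPair P[j] x k then (1:Int) else 0) = (P.length : Int) - 1)
        ↔ (T.all (fun pr => canReformat pr x k) = true) := by
      rw [hcov x hxmem, hall, hreach]
      split_ifs with hr <;> push_cast <;> omega
    have hoff : (T.map (fun pr => if pr.1 + pr.2 = x then (1:Int) else 0)).sum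
        = (S.count x : Int) - 1 := by
      rw [sum_ite_eq_countP]
      have hcnt : S.count x = P.countP (fun p => p.1 + p.2 == x) := by
        subst hS; rw [List.count_eq_countP, List.countP_map]; rfl
      rw [hcnt, countP_split P j hjlt (fun p => p.1 + p.2 == x)]
      have hjx : (P[j].1 + P[j].2 == x) = true := by simp [hxv]
      simp [hjx, hT, List.countP_append]
    show solveLoop n k P S (ii :: rest) = solveAltLoop n k (P.length : Int) P S counts cov (ii :: rest)
    rw [solveLoop, solveAltLoop]
    simp only [hxd, hprd, hslice]
    rw [hc x]
    by_cases hA : T.all (fun pr => canReformat pr x k) = true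
    · rw [if_pos hA, if_pos (hcond.mpr hA), hoff, truncHalf_eq_tdiv]
      ring_nf
    · rw [if_neg hA, if_neg (fun h => hA (hcond.mp h))]
      exact ih (fun i hi => hidx i (List.mem_cons_of_mem _ hi))



lemma glue (n k m : Int) (P : List (Int × Int)) (hPlen : (P.length : Int) = m) :
    (if PySem.List.count (P.map (fun p => p.1 + p.2)) (PySem.List.pyGetD (P.map (fun p => p.1 + p.2)) 0 0)
          = (P.map (fun p => p.1 + p.2)).length then (0:Int)
      else solveLoop n k P (P.map (fun p => p.1 + p.2))
        (PySem.List.pyRange 0 ((P.map (fun p => p.1 + p.2)).length : Int) 1))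
    = (if PySem.List.count (P.map (fun p => p.1 + p.2)) (PySem.List.pyGetD (P.map (fun p => p.1 + p.2)) 0 0)
          = (P.map (fun p => p.1 + p.2)).length then (0:Int)
      else solveAltLoop n k m P (P.map (fun p => p.1 + p.2))
        (buildCounts (P.map (fun p => p.1 + p.2)))
        (buildCov k P (buildCounts (P.map (fun p => p.1 + p.2))).keys)
        (PySem.List.pyRange 0 m 1)) := by
  set S := P.map (fun p => p.1 + p.2) with hS
  by_cases h0 : PySem.List.count S (PySem.List.pyGetD S 0 0) = S.length
  · rw [if_pos h0, if_pos h0]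
  · rw [if_neg h0, if_neg h0]
    have hSlen : (S.length : Int) = m := by rw [hS, List.length_map, hPlen]
    rw [hSlen, ← hPlen]
    apply loop_eq n k P S hS
    · intro x; exact getD_buildCounts S x
    · intro x hx
      rw [keys_buildCounts]
      exact getD_buildCov k P _ x (by simp [pysem, hx])
    · intro i hi
      rw [PySem.List.mem_pyRange_one] at hi
      omega

-- ===== VERDICT (by name: the statement is the Claim_ definition above) =====
theorem solve_spec : Claim_equal_solve := by
  unfold Claim_equal_solve
  intro n k a _ _
  unfold Spec_solve
  show solve n k a = solve_alt n k a
  simp only [solve, solve_alt, get_pairs_eq_altPairs]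
  apply glue
  · unfold altPairs
    rw [List.length_map, PySem.List.length_pyRange_one]
    rw [PySem.Int.floordiv_eq_ediv_of_pos (by omega)]; omega
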